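-- pv_equiv track=rewrite | github.com/jakashnarayanan/Python-robotics-navigation-interview-question | pooker.py | two_nearest_ball
-- ===== SOURCE A (Python) =====
-- def two_nearest_ball(d): # returns two nearest ball from the orgin of striker
--     sd = float('inf')
--     ssd = float('inf')
--     for num in d:
--         if num <= sd:
--             sd,ssd = num,sd
--         elif num <= ssd:
--             ssd = num
--     return sd,ssd,inputs[1+d.index(sd)],inputs[1+d.index(ssd)]
--
-- inputs = [(40,50),(70,50),(60,80),(70,20),(160,20),(180,35),(120,70),(190,80),(40,80),(100,60)]
-- ===== SOURCE B (Python) =====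
-- inputs = [(40,50),(70,50),(60,80),(70,20),(160,20),(180,35),(120,70),(190,80),(40,80),(100,60)]
--
-- def two_nearest_ball(d): # returns two nearest ball from the orgin of striker
--     sd = min(d)
--     rest = list(d)
--     rest.remove(sd)
--     ssd = min(rest)
--     return sd, ssd, inputs[1+d.index(sd)], inputs[1+d.index(ssd)]
-- ===== Notes on version B (the rewrite author's own statement) =====
-- stated objective: simpler
-- what changed: The hand-rolled two-minimum tracking loop is replaced by two staged passes: take min(d), remove one occurrence of it, take min of the rest; the return expression is unchanged.
import Mathlib
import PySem

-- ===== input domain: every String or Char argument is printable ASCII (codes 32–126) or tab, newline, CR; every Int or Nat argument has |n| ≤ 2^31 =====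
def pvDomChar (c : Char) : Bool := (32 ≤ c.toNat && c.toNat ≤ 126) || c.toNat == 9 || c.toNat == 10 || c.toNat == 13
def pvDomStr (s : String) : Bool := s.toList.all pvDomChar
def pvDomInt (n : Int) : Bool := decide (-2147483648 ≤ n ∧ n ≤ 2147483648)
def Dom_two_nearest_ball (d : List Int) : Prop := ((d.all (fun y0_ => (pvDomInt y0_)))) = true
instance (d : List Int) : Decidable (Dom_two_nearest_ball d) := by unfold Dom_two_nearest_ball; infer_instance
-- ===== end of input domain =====

-- B replaces A's hand-rolled two-minimum tracking loop by two staged passes: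
-- min(d), remove one occurrence, min of the rest; the return expression is unchanged (objective: simpler).

-- ===== PORT A =====
-- the module-level constant `inputs`
def pyInputs : List (Int × Int) :=
  [(40,50),(70,50),(60,80),(70,20),(160,20),(180,35),(120,70),(190,80),(40,80),(100,60)]

-- `num <= sd` where sd may still be float('inf') (modelled as `none`)
def leInf (num : Int) : Option Int → Bool
  | none => true
  | some v => num ≤ v

-- one iteration of A's for-loop over the state (sd, ssd)
def twoStep (st : Option Int × Option Int) (num : Int) : Option Int × Option Int :=
  if leInf num st.1 then (some num, st.1)
  else if leInf num st.2 then (st.1, some num)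
  else st

-- A's return line `sd, ssd, inputs[1+d.index(sd)], inputs[1+d.index(ssd)]`
-- (any `none` corresponds to a Python exception; those inputs are outside Pre_)
def finishTNB (d : List Int) (sd ssd : Option Int) : Int × Int × (Int × Int) × (Int × Int) :=
  match sd, ssd with
  | some a, some b =>
    match PySem.List.index? d a, PySem.List.index? d b with
    | some i, some j =>
      match PySem.List.pyGet? pyInputs (1 + (i : Int)), PySem.List.pyGet? pyInputs (1 + (j : Int)) with
      | some p, some q => (a, b, p, q)
      | _, _ => (0, 0, (0, 0), (0, 0))
    | _, _ => (0, 0, (0, 0), (0, 0))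
  | _, _ => (0, 0, (0, 0), (0, 0))

def two_nearest_ball (d : List Int) : Int × Int × (Int × Int) × (Int × Int) :=
  let st := d.foldl twoStep (none, none)
  finishTNB d st.1 st.2

-- ===== PORT B =====
-- `inputs[1 + d.index(v)]` as an Option chain (none = a Python exception, outside Pre_)
def ballAt (d : List Int) (v : Int) : Option (Int × Int) :=
  (PySem.List.index? d v).bind fun i => PySem.List.pyGet? pyInputs (1 + (i : Int))

def two_nearest_ball_alt (d : List Int) : Int × Int × (Int × Int) × (Int × Int) :=
  ((PySem.List.min? d (fun x => x)).bind fun sd =>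
    (PySem.List.remove? d sd).bind fun rest =>
      (PySem.List.min? rest (fun x => x)).bind fun ssd =>
        (ballAt d sd).bind fun p =>
          (ballAt d ssd).map fun q =>
            (sd, ssd, p, q)).getD (0, 0, (0, 0), (0, 0))

-- ===== PRECONDITION & SPEC =====
-- Pre_ excludes exactly the inputs on which Python A raises: fewer than two distances
-- (d.index(float('inf')) raises ValueError) or a nearest/second-nearest distance whose first
-- occurrence lies at index ≥ 9 (inputs[1+idx] raises IndexError, len(inputs) = 10).
def Pre_two_nearest_ball (d : List Int) : Prop :=
  2 ≤ d.length ∧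
  (PySem.List.index? d ((PySem.List.sorted d (fun x => x) false).getD 0 0)).getD 0 < 9 ∧
  (PySem.List.index? d ((PySem.List.sorted d (fun x => x) false).getD 1 0)).getD 0 < 9
instance (d : List Int) : Decidable (Pre_two_nearest_ball d) := by unfold Pre_two_nearest_ball; infer_instance

def pvWitness_two_nearest_ball : List Int := [5, 3, 7]

def Spec_two_nearest_ball (d : List Int) (out : Int × Int × (Int × Int) × (Int × Int)) : Prop := out = two_nearest_ball_alt d
instance (d : List Int) (out : Int × Int × (Int × Int) × (Int × Int)) : Decidable (Spec_two_nearest_ball d out) := by unfold Spec_two_nearest_ball; infer_instance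

-- ===== CLAIM (what is proved, stated in full; the proofs are below) =====
def Claim_equal_two_nearest_ball : Prop := ∀ (d : List Int), Dom_two_nearest_ball d → Pre_two_nearest_ball d → Spec_two_nearest_ball d (two_nearest_ball d)

-- ===== LEMMAS AND PROOFS =====

-- the two smallest (with multiplicity) as the tracker's state
def first2 (s : List Int) : Option Int × Option Int := (s[0]?, s[1]?)

-- one tracker step = one ordered insertion, viewed through the first two elements
theorem first2_orderedInsert (s : List Int) (x : Int) :
    first2 (List.orderedInsert (· ≤ ·) x s) = twoStep (first2 s) x := by
  match s with
  | [] => simp [first2, twoStep, leInf]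
  | [a] =>
    by_cases h : x ≤ a <;>
      simp [first2, twoStep, leInf, List.orderedInsert, h]
  | a :: b :: t =>
    by_cases h1 : x ≤ a
    · simp [first2, twoStep, leInf, List.orderedInsert, h1]
    · by_cases h2 : x ≤ b <;>
        simp [first2, twoStep, leInf, List.orderedInsert, h1, h2]

-- Python's sort of d ++ [x] is an ordered insertion of x into the sort of d
theorem sorted_append_singleton (p : List Int) (x : Int) :
    PySem.List.sorted (p ++ [x]) (fun x => x) false
      = List.orderedInsert (· ≤ ·) x (PySem.List.sorted p (fun x => x) false) := by
  apply PySem.List.sorted_id_eq_of_perm_of_pairwise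
  · exact (List.perm_orderedInsert _ x _).trans
      (((PySem.List.sorted_perm p (fun x => x) false).cons x).trans
        (by simpa using (List.perm_append_comm (l₁ := [x]) (l₂ := p))))
  · exact List.Pairwise.orderedInsert x _ (PySem.List.sorted_pairwise p (fun x => x))

-- invariant: A's tracker state is the first two elements of the sorted list
theorem foldl_twoStep_eq (d : List Int) :
    d.foldl twoStep (none, none) = first2 (PySem.List.sorted d (fun x => x) false) := by
  induction d using List.reverseRecOn with
  | nil => simp [first2]
  | append_singleton p x ih =>
    rw [List.foldl_append, List.foldl_cons, List.foldl_nil, ih,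
      sorted_append_singleton, first2_orderedInsert]

-- min(d) is the head of sorted(d)
theorem min?_eq_sorted_head (d : List Int) (a : Int) (t : List Int)
    (hs : PySem.List.sorted d (fun x => x) false = a :: t) :
    PySem.List.min? d (fun x => x) = some a := by
  have hne : d ≠ [] := by
    intro h; rw [h] at hs; simp [PySem.List.sorted] at hs
  obtain ⟨m, hm⟩ : ∃ m, PySem.List.min? d (fun x => x) = some m := by
    cases h : PySem.List.min? d (fun x => x) with
    | none => exact absurd ((PySem.List.min?_eq_none_iff _ _).mp h) hne
    | some m => exact ⟨m, rfl⟩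
  have hmmem : m ∈ d := PySem.List.min?_mem hm
  have hamem : a ∈ d := by
    have : a ∈ PySem.List.sorted d (fun x => x) false := by rw [hs]; simp
    exact (PySem.List.mem_sorted _ _ _ _).mp this
  have h1 : a ≤ m := PySem.List.key_head_sorted_le d (fun x => x) hs m hmmem
  have h2 : m ≤ a := PySem.List.min?_isMin hm a hamem
  rw [hm]; exact congrArg some (le_antisymm h2 h1)
  
-- min of d with one copy of its minimum removed is the second element of sorted(d)
theorem min?_erase_eq (d : List Int) (a b : Int) (t : List Int)
    (hs : PySem.List.sorted d (fun x => x) false = a :: b :: t) :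
    PySem.List.min? (d.erase a) (fun x => x) = some b := by
  have hperm : (d.erase a).Perm (b :: t) := by
    have hp : d.Perm (a :: b :: t) := by
      rw [← hs]; exact (PySem.List.sorted_perm d (fun x => x) false).symm
    have := hp.erase a
    simpa using this
  have hne : d.erase a ≠ [] := by
    intro h; rw [h] at hperm; exact absurd hperm.symm (by simp)
  obtain ⟨m, hm⟩ : ∃ m, PySem.List.min? (d.erase a) (fun x => x) = some m := by
    cases h : PySem.List.min? (d.erase a) (fun x => x) with
    | none => exact absurd ((PySem.List.min?_eq_none_iff _ _).mp h) hne
    | some m => exact ⟨m, rfl⟩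
  have hpw : (a :: b :: t).Pairwise (fun x y : Int => x ≤ y) := by
    rw [← hs]; exact PySem.List.sorted_pairwise d (fun x => x)
  have hmmem : m ∈ b :: t := hperm.mem_iff.mp (PySem.List.min?_mem hm)
  have h1 : b ≤ m := by
    rcases List.mem_cons.mp hmmem with h | h
    · exact le_of_eq h.symm
    
    · exact (List.pairwise_cons.mp (List.pairwise_cons.mp hpw).2).1 m h
  have h2 : m ≤ b :=
    PySem.List.min?_isMin hm b (hperm.mem_iff.mpr (by simp))
  rw [hm]; exact congrArg some (le_antisymm h2 h1)

-- ===== VERDICT (by name: the statement is the Claim_ definition above) =====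
theorem two_nearest_ball_spec : Claim_equal_two_nearest_ball := by
  intro d _ hpre
  obtain ⟨a, b, t, hs⟩ : ∃ a b t, PySem.List.sorted d (fun x => x) false = a :: b :: t := by
    have hlen : 2 ≤ (PySem.List.sorted d (fun x => x) false).length := by
      rw [PySem.List.length_sorted]; exact hpre.1
    match h : PySem.List.sorted d (fun x => x) false with
    | [] => rw [h] at hlen; simp at hlen
    | [x] => rw [h] at hlen; simp at hlen
    | x :: y :: s => exact ⟨x, y, s, rfl⟩
  have hamem : a ∈ d := (PySem.List.mem_sorted _ _ _ _).mp (by rw [hs]; simp)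
  unfold Spec_two_nearest_ball two_nearest_ball two_nearest_ball_alt
  dsimp only
  rw [foldl_twoStep_eq, hs, min?_eq_sorted_head d a (b :: t) hs]
  simp only [Option.bind_some]
  rw [PySem.List.remove?_eq_some_erase d a hamem]
  simp only [Option.bind_some]
  rw [min?_erase_eq d a b t hs]
  simp only [Option.bind_some]
  unfold finishTNB first2 ballAt
  simp only [List.getElem?_cons_zero, List.getElem?_cons_succ]
  cases hia : PySem.List.index? d a with
  | none => simp
  | some i =>
    cases hib : PySem.List.index? d b with
    | none => simp
    | some j =>
      simp only [Option.bind_some]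
      cases PySem.List.pyGet? pyInputs (1 + (i : Int)) with
      | none => simp
      | some p =>
        cases PySem.List.pyGet? pyInputs (1 + (j : Int)) with
        | none => simp
        | some q => simp
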